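-- pv_equiv track=rewrite | github.com/lfuegner/Bachelorarbeit | sequence_/row.py | _generateRowList
-- ===== SOURCE A (Python) =====
-- import math
--
-- def _generateRowList(total_seats: int, alt: int) -> list:
--   RowList: list = []
--   alternate = alt + 1
--   total_rows = math.ceil((total_seats + 3) / 6)
--
--   for i in range(alternate):
--     for row in range(total_rows,0,-alternate):
--       RowList.append(row)
--     total_rows -= 1
--
--   return RowList
-- ===== SOURCE B (Python) =====
-- def _generateRowList(total_seats: int, alt: int) -> list:
--     alternate = alt + 1
--     total_rows = -((-(total_seats + 3)) // 6)  # integer ceil((total_seats+3)/6)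
--     if alternate <= 0:
--         return []
--     buckets = [[] for _ in range(alternate)]
--     for v in range(total_rows, 0, -1):
--         buckets[(total_rows - v) % alternate].append(v)
--     out = []
--     for b in buckets:
--         out += b
--     return out
-- ===== Notes on version B (the rewrite author's own statement) =====
-- stated objective: alternative
-- what changed: A's nested loops (one residue-stepping inner range per outer iteration, with a decreasing row counter) are replaced by a single descending scan v = T..1 that distributes each row into bucket (T - v) % alternate and then concatenates the buckets; the float math.ceil is replaced by integer ceiling arithmetic.
import Mathlib
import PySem

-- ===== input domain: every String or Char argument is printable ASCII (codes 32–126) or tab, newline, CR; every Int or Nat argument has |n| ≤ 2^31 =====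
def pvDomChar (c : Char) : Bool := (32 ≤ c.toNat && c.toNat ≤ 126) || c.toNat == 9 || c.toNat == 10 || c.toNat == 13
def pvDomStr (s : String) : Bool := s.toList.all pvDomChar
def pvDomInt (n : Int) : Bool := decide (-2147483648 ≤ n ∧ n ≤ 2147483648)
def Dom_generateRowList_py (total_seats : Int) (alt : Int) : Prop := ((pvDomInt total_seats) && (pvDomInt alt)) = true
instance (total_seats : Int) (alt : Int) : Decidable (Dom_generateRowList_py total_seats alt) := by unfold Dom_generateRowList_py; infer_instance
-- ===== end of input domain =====

-- B replaces A's nested residue-stepping loops by one descending scan that distributes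
-- the row numbers into `alternate` buckets and concatenates them (objective: alternative).

-- ===== PORT A =====
-- math.ceil((total_seats + 3) / 6) is ported as the integer ceiling floordiv(total_seats + 3 + 5, 6);
-- exact on the |n| ≤ 2^31 domain, where the float quotient's ceil equals the exact rational's ceil.
def generateRowList_py (total_seats : Int) (alt : Int) : List Int :=
  let alternate := alt + 1
  let total_rows := PySem.Int.floordiv (total_seats + 3 + 5) 6
  ((PySem.List.pyRange 0 alternate 1).foldl
      (fun (st : List Int × Int) (_i : Int) =>
        (st.1 ++ PySem.List.pyRange st.2 0 (-alternate), st.2 - 1))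
      ([], total_rows)).1

-- ===== PORT B =====
-- Source B computes the ceiling as -((-(total_seats + 3)) // 6)
def generateRowList_py_alt (total_seats : Int) (alt : Int) : List Int :=
  let alternate := alt + 1
  let total_rows := -(PySem.Int.floordiv (-(total_seats + 3)) 6)
  if alternate ≤ 0 then []
  else
    let buckets0 := (List.range alternate.toNat).map (fun _ => ([] : List Int))
    let buckets := (PySem.List.pyRange total_rows 0 (-1)).foldl
        (fun bs v => bs.modify (PySem.Int.mod (total_rows - v) alternate).toNat (· ++ [v]))
        buckets0
    buckets.foldl (fun out b => out ++ b) []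

-- ===== PRECONDITION & SPEC =====
def Spec_generateRowList_py (total_seats : Int) (alt : Int) (out : List Int) : Prop := out = generateRowList_py_alt total_seats alt
instance (total_seats : Int) (alt : Int) (out : List Int) : Decidable (Spec_generateRowList_py total_seats alt out) := by unfold Spec_generateRowList_py; infer_instance

-- ===== CLAIM (what is proved, stated in full; the proofs are below) =====
def Claim_equal_generateRowList_py : Prop := ∀ (total_seats : Int) (alt : Int), Dom_generateRowList_py total_seats alt → Spec_generateRowList_py total_seats alt (generateRowList_py total_seats alt)

-- ===== LEMMAS AND PROOFS =====

-- the two integer-ceiling forms agree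
lemma ceil_forms (x : Int) : PySem.Int.floordiv (x + 5) 6 = -(PySem.Int.floordiv (-x) 6) := by
  unfold PySem.Int.floordiv
  rw [Int.fdiv_eq_ediv, Int.fdiv_eq_ediv]
  rw [if_pos (Or.inl (by norm_num : (0:Int) ≤ 6)), if_pos (Or.inl (by norm_num : (0:Int) ≤ 6))]
  omega

-- pyRange with a negative step -s (s > 0): nil and cons unfoldings
lemma pyRange_negs_eq_nil {a b s : Int} (hs : 0 < s) (h : a ≤ b) :
    PySem.List.pyRange a b (-s) = [] := by
  unfold PySem.List.pyRange
  simp only [show ¬((-s : Int) = 0) from by omega, if_false]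
  rw [if_neg (by omega : ¬ (0:Int) < -s), if_neg (by omega : ¬ b < a)]
  simp

lemma pyRange_negs_cons {a b s : Int} (hs : 0 < s) (h : b < a) :
    PySem.List.pyRange a b (-s) = a :: PySem.List.pyRange (a - s) b (-s) := by
  unfold PySem.List.pyRange
  simp only [show ¬((-s : Int) = 0) from by omega, if_false, neg_neg]
  rw [if_neg (by omega : ¬ (0:Int) < -s), if_neg (by omega : ¬ (0:Int) < -s),
      if_pos h]
  have hcount : ((a - b + s - 1) / s).toNat
      = (if b < a - s then ((a - s - b + s - 1) / s).toNat else 0) + 1 := by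
    by_cases hc : b < a - s
    · have hx : (0:Int) ≤ a - s - b + s - 1 := by omega
      have he : a - b + s - 1 = (a - s - b + s - 1) + 1 * s := by ring
      rw [he, Int.add_mul_ediv_right _ _ (by omega : s ≠ 0)]
      have hnn : 0 ≤ (a - s - b + s - 1) / s := Int.ediv_nonneg hx (by omega)
      simp only [if_pos hc]; omega
    · have hr0 : (0:Int) ≤ a - b - 1 := by omega
      have hrlt : a - b - 1 < s := by omega
      have he : a - b + s - 1 = (a - b - 1) + 1 * s := by ring
      rw [he, Int.add_mul_ediv_right _ _ (by omega : s ≠ 0),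
          Int.ediv_eq_zero_of_lt hr0 hrlt]
      simp [hc]
  rw [hcount, List.range_succ_eq_map, List.map_cons, List.map_map]
  refine congrArg₂ (· :: ·) (by push_cast; ring) ?_
  apply List.map_congr_left
  intro k _
  simp only [Function.comp_apply, Nat.succ_eq_add_one]
  push_cast; ring

-- PySem.Int.mod with a positive divisor is emod
lemma pymod_pos (x a : Int) (ha : 0 < a) : PySem.Int.mod x a = x % a := by
  unfold PySem.Int.mod
  rw [Int.fmod_eq_emod, if_pos (Or.inl (by omega : (0:Int) ≤ a))]
  ring

lemma emod_succ (x a : Int) (ha : 0 < a) :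
    (x + 1) % a = if x % a = a - 1 then 0 else x % a + 1 := by
  have hd := Int.mul_ediv_add_emod x a
  have h1 : (x + 1) % a = (x % a + 1) % a := by
    conv_lhs => rw [show x + 1 = (x % a + 1) + a * (x / a) from by omega]
    rw [Int.add_mul_emod_self_left]
  have hr0 : 0 ≤ x % a := Int.emod_nonneg x (by omega)
  have hrlt : x % a < a := Int.emod_lt_of_pos x ha
  by_cases hc : x % a = a - 1
  · rw [h1, hc, if_pos rfl, show a - 1 + 1 = a from by ring, Int.emod_self]
  · rw [h1, if_neg hc, Int.emod_eq_of_lt (by omega) (by omega)]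

-- ==== A-side characterisation ====

-- the inner-loop pieces, iterated n times with the row counter decreasing
def gAux (a : Int) : Nat → Int → List Int
  | 0, _ => []
  | n+1, t => PySem.List.pyRange t 0 (-a) ++ gAux a n (t - 1)

lemma foldA (a : Int) (l : List Int) (acc : List Int) (t : Int) :
    (l.foldl (fun (st : List Int × Int) (_i : Int) =>
        (st.1 ++ PySem.List.pyRange st.2 0 (-a), st.2 - 1)) (acc, t)).1
      = acc ++ gAux a l.length t := by
  induction l generalizing acc t with
  | nil => simp [gAux]
  | cons x xs ih =>
      simp only [List.foldl_cons, List.length_cons, gAux, ih, List.append_assoc]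

lemma gAux_eq_flatMap (a : Int) (n : Nat) (t : Int) :
    gAux a n t = (List.range n).flatMap (fun (j : Nat) => PySem.List.pyRange (t - (j : Int)) 0 (-a)) := by
  induction n generalizing t with
  | zero => simp [gAux]
  | succ m ih =>
      rw [gAux, List.range_succ_eq_map, List.flatMap_cons, ih, List.flatMap_map]
      refine congrArg₂ (· ++ ·) (by norm_num) ?_
      have hfe : (fun (j : Nat) => PySem.List.pyRange (t - ((Nat.succ j : Nat) : Int)) 0 (-a))
          = fun (j : Nat) => PySem.List.pyRange (t - 1 - (j : Int)) 0 (-a) := by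
        funext j; congr 1; push_cast; ring
      simpa [Function.comp] using (congrArg (fun f => List.flatMap f (List.range m)) hfe).symm

-- ==== B-side characterisation ====

lemma buckets_length (k : Int → Nat) (l : List Int) (bs : List (List Int)) :
    (l.foldl (fun bs v => bs.modify (k v) (· ++ [v])) bs).length = bs.length := by
  induction l generalizing bs with
  | nil => rfl
  | cons x xs ih => simp only [List.foldl_cons, ih, List.length_modify]

lemma buckets_get (k : Int → Nat) (l : List Int) (bs : List (List Int))
    (hk : ∀ v ∈ l, k v < bs.length) (j : Nat) (hj : j < bs.length) :
    (l.foldl (fun bs v => bs.modify (k v) (· ++ [v])) bs)[j]'(by rw [buckets_length]; exact hj)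
      = bs[j] ++ l.filter (fun v => decide (k v = j)) := by
  induction l generalizing bs with
  | nil => simp
  | cons x xs ih =>
      simp only [List.foldl_cons, List.filter_cons]
      have hjm : j < (bs.modify (k x) (· ++ [x])).length := by
        rw [List.length_modify]; exact hj
      rw [ih (bs.modify (k x) (· ++ [x]))
            (fun v hv => by rw [List.length_modify]; exact hk v (List.mem_cons_of_mem _ hv)) hjm]
      by_cases hc : k x = j
      · rw [List.getElem_modify]
        simp [hc, List.append_assoc]
      · rw [List.getElem_modify]
        simp [hc]

lemma foldl_append_eq_flatten (bs : List (List Int)) (acc : List Int) :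
    bs.foldl (fun out b => out ++ b) acc = acc ++ bs.flatten := by
  induction bs generalizing acc with
  | nil => simp
  | cons b tl ih => simp [List.foldl_cons, ih, List.append_assoc]

-- the key filter identity: among t, t-1, …, 1, the values v with (t - v) ≡ j (mod a)
-- are exactly range(t - j, 0, -a), in the same (descending) order
lemma filter_key_eq_pyRange (a : Int) (ha : 0 < a) :
    ∀ (n : Nat) (t : Int), t.toNat = n → ∀ (j : Nat), j < a.toNat →
      (PySem.List.pyRange t 0 (-1)).filter
          (fun v => decide (((t - v) % a).toNat = j))
        = PySem.List.pyRange (t - (j : Int)) 0 (-a) := by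
  intro n
  induction n with
  | zero =>
      intro t ht j hj
      rw [PySem.List.pyRange_neg_one_eq_nil (by omega : t ≤ 0), List.filter_nil,
          pyRange_negs_eq_nil ha (by omega : t - (j:Int) ≤ 0)]
  | succ m ih =>
      intro t ht j hj
      rw [PySem.List.pyRange_neg_one_cons (by omega : (0:Int) < t), List.filter_cons]
      by_cases hc : j = 0
      · subst hc
        rw [if_pos (by simp)]
        have hcong : (PySem.List.pyRange (t-1) 0 (-1)).filter
              (fun v => decide (((t - v) % a).toNat = 0))
            = (PySem.List.pyRange (t-1) 0 (-1)).filter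
              (fun v => decide ((((t-1) - v) % a).toNat = a.toNat - 1)) := by
          apply List.filter_congr
          intro v _
          rw [decide_eq_decide]
          have hs := emod_succ (t - 1 - v) a ha
          have hr0 : 0 ≤ (t - 1 - v) % a := Int.emod_nonneg _ (by omega)
          have hrlt : (t - 1 - v) % a < a := Int.emod_lt_of_pos _ ha
          rw [show t - v = (t - 1 - v) + 1 from by ring, hs]
          split_ifs with hcase <;> omega
        rw [hcong, ih (t-1) (by omega) (a.toNat - 1) (by omega),
            pyRange_negs_cons ha (by omega : (0:Int) < t - ((0:Nat):Int))]
        congr 2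
        · push_cast; ring
        · push_cast; omega
      · rw [if_neg (by simp [sub_self]; omega)]
        have hcong : (PySem.List.pyRange (t-1) 0 (-1)).filter
              (fun v => decide (((t - v) % a).toNat = j))
            = (PySem.List.pyRange (t-1) 0 (-1)).filter
              (fun v => decide ((((t-1) - v) % a).toNat = j - 1)) := by
          apply List.filter_congr
          intro v _
          rw [decide_eq_decide]
          have hs := emod_succ (t - 1 - v) a ha
          have hr0 : 0 ≤ (t - 1 - v) % a := Int.emod_nonneg _ (by omega)
          have hrlt : (t - 1 - v) % a < a := Int.emod_lt_of_pos _ ha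
          rw [show t - v = (t - 1 - v) + 1 from by ring, hs]
          split_ifs with hcase <;> omega
        rw [hcong, ih (t-1) (by omega) (j - 1) (by omega)]
        congr 1
        omega

-- the whole equivalence, stated over the generic row count t
lemma main_eq (a t : Int) (ha : 0 < a) :
    ((PySem.List.pyRange 0 a 1).foldl
        (fun (st : List Int × Int) (_i : Int) =>
          (st.1 ++ PySem.List.pyRange st.2 0 (-a), st.2 - 1)) ([], t)).1
      = (((PySem.List.pyRange t 0 (-1)).foldl
            (fun bs v => bs.modify (PySem.Int.mod (t - v) a).toNat (· ++ [v]))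
            ((List.range a.toNat).map (fun _ => ([] : List Int)))).foldl
          (fun out b => out ++ b) []) := by
  -- A side
  rw [foldA, PySem.List.length_pyRange_one, gAux_eq_flatMap, List.nil_append, sub_zero]
  -- B side
  set k : Int → Nat := fun v => (PySem.Int.mod (t - v) a).toNat with hk
  have hklt : ∀ v ∈ PySem.List.pyRange t 0 (-1),
      k v < ((List.range a.toNat).map (fun _ => ([] : List Int))).length := by
    intro v _
    have h1 : PySem.Int.mod (t - v) a = (t - v) % a := pymod_pos _ _ ha
    have h2 : 0 ≤ (t - v) % a := Int.emod_nonneg _ (by omega)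
    have h3 : (t - v) % a < a := Int.emod_lt_of_pos _ ha
    simp only [hk, List.length_map, List.length_range, h1]
    omega
  have hbuckets : (PySem.List.pyRange t 0 (-1)).foldl
        (fun bs v => bs.modify (k v) (· ++ [v]))
        ((List.range a.toNat).map (fun _ => ([] : List Int)))
      = (List.range a.toNat).map
          (fun j => (PySem.List.pyRange t 0 (-1)).filter (fun v => decide (k v = j))) := by
    apply List.ext_getElem
    · rw [buckets_length]; simp
    · intro i h1 h2
      have hi : i < a.toNat := by simpa using h2
      rw [buckets_get k _ _ hklt i (by simpa using hi)]
      simp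
  rw [hbuckets, foldl_append_eq_flatten, List.nil_append, ← List.flatMap_def]
  rw [List.flatMap_def, List.flatMap_def]
  congr 1
  apply List.map_congr_left
  intro j hj
  have hjlt : j < a.toNat := List.mem_range.mp hj
  have hfilt : (PySem.List.pyRange t 0 (-1)).filter (fun v => decide (k v = j))
      = (PySem.List.pyRange t 0 (-1)).filter (fun v => decide (((t - v) % a).toNat = j)) := by
    apply List.filter_congr
    intro v _
    simp only [hk, pymod_pos _ _ ha]
  rw [hfilt, filter_key_eq_pyRange a ha t.toNat t rfl j hjlt]

-- ===== VERDICT (by name: the statement is the Claim_ definition above) =====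
theorem generateRowList_py_spec : Claim_equal_generateRowList_py := by
  intro ts alt _dom
  unfold Spec_generateRowList_py generateRowList_py generateRowList_py_alt
  simp only [ceil_forms (ts + 3)]
  by_cases hA : alt + 1 ≤ 0
  · rw [if_pos hA, PySem.List.pyRange_one_eq_nil (by omega : alt + 1 ≤ 0)]
    rfl
  · rw [if_neg hA]
    exact main_eq (alt + 1) (-(PySem.Int.floordiv (-(ts + 3)) 6)) (by omega)
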